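-- pv_equiv track=rewrite | github.com/rajtrafficradius/LEAD_FORGE_LEAD_GENERATOR | V5.py | _get_name_variants
-- ===== SOURCE A (Python) =====
-- _NAME_ABBREVIATIONS = {
--     "matt": ["matthew", "mathew"], "mike": ["michael"], "chris": ["christopher", "christine", "christina"],
--     "rob": ["robert", "robin"], "bob": ["robert"], "dave": ["david"], "dan": ["daniel", "danny"],
--     "nick": ["nicholas", "nicolas"], "tom": ["thomas"], "ben": ["benjamin"], "sam": ["samuel", "samantha"],
--     "alex": ["alexander", "alexandra"], "max": ["maxwell", "maximilian"], "will": ["william"],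
--     "jim": ["james"], "joe": ["joseph"], "steve": ["steven", "stephen"], "tony": ["anthony"],
--     "kate": ["katherine", "kathryn", "catherine"], "liz": ["elizabeth"], "meg": ["megan", "margaret"],
--     "jen": ["jennifer", "jenna"], "pat": ["patrick", "patricia"], "andy": ["andrew"],
--     "rick": ["richard"], "dick": ["richard"], "bill": ["william"], "ted": ["edward", "theodore"],
--     "pete": ["peter"], "greg": ["gregory"], "tim": ["timothy"], "jon": ["jonathan", "jonathon"],
--     "stu": ["stuart", "stewart"], "phil": ["philip", "phillip"], "ed": ["edward", "edmund"],
--     "ash": ["ashley", "ashton"], "jake": ["jacob"], "jack": ["jackson", "john"],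
--     "nate": ["nathan", "nathaniel"], "josh": ["joshua"], "zach": ["zachary"],
--     "luke": ["lucas"], "brad": ["bradley"], "drew": ["andrew"],
--     "mel": ["melissa", "melanie"], "bec": ["rebecca"], "soph": ["sophia", "sophie"],
--     "nat": ["natalie", "natasha", "nathan"], "em": ["emma", "emily"],
--     "kel": ["kelly", "kelvin"], "les": ["leslie", "lester"],
--     "russ": ["russell"], "mick": ["michael"],
-- }
--
-- def _get_name_variants(first_name: str) -> list[str]:
--     """Return all possible full-form variants of a first name (including itself)."""
--     lower = first_name.lower()
--     variants = [lower]
--     if lower in _NAME_ABBREVIATIONS: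
--         variants.extend(_NAME_ABBREVIATIONS[lower])
--     # Also check if any abbreviation maps TO this name (reverse lookup)
--     for abbrev, fulls in _NAME_ABBREVIATIONS.items():
--         if lower in fulls and abbrev not in variants:
--             variants.append(abbrev)
--     return variants
-- ===== SOURCE B (Python) =====
-- # Precomputed flat variant table: every name that appears in the abbreviation
-- # dict (as key or full form) maps directly to its complete variant list (in
-- # A's output order), so a call is one dict lookup instead of any scan.
-- _VARIANTS = {
--     "matt": ["matthew", "mathew"],
--     "matthew": ["matt"],
--     "mathew": ["matt"],
--     "mike": ["michael"],
--     "michael": ["mike", "mick"],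
--     "chris": ["christopher", "christine", "christina"],
--     "christopher": ["chris"],
--     "christine": ["chris"],
--     "christina": ["chris"],
--     "rob": ["robert", "robin"],
--     "robert": ["rob", "bob"],
--     "robin": ["rob"],
--     "bob": ["robert"],
--     "dave": ["david"],
--     "david": ["dave"],
--     "dan": ["daniel", "danny"],
--     "daniel": ["dan"],
--     "danny": ["dan"],
--     "nick": ["nicholas", "nicolas"],
--     "nicholas": ["nick"],
--     "nicolas": ["nick"],
--     "tom": ["thomas"],
--     "thomas": ["tom"],
--     "ben": ["benjamin"],
--     "benjamin": ["ben"],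
--     "sam": ["samuel", "samantha"],
--     "samuel": ["sam"],
--     "samantha": ["sam"],
--     "alex": ["alexander", "alexandra"],
--     "alexander": ["alex"],
--     "alexandra": ["alex"],
--     "max": ["maxwell", "maximilian"],
--     "maxwell": ["max"],
--     "maximilian": ["max"],
--     "will": ["william"],
--     "william": ["will", "bill"],
--     "jim": ["james"],
--     "james": ["jim"],
--     "joe": ["joseph"],
--     "joseph": ["joe"],
--     "steve": ["steven", "stephen"],
--     "steven": ["steve"],
--     "stephen": ["steve"],
--     "tony": ["anthony"],
--     "anthony": ["tony"],
--     "kate": ["katherine", "kathryn", "catherine"],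
--     "katherine": ["kate"],
--     "kathryn": ["kate"],
--     "catherine": ["kate"],
--     "liz": ["elizabeth"],
--     "elizabeth": ["liz"],
--     "meg": ["megan", "margaret"],
--     "megan": ["meg"],
--     "margaret": ["meg"],
--     "jen": ["jennifer", "jenna"],
--     "jennifer": ["jen"],
--     "jenna": ["jen"],
--     "pat": ["patrick", "patricia"],
--     "patrick": ["pat"],
--     "patricia": ["pat"],
--     "andy": ["andrew"],
--     "andrew": ["andy", "drew"],
--     "rick": ["richard"],
--     "richard": ["rick", "dick"],
--     "dick": ["richard"],
--     "bill": ["william"],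
--     "ted": ["edward", "theodore"],
--     "edward": ["ted", "ed"],
--     "theodore": ["ted"],
--     "pete": ["peter"],
--     "peter": ["pete"],
--     "greg": ["gregory"],
--     "gregory": ["greg"],
--     "tim": ["timothy"],
--     "timothy": ["tim"],
--     "jon": ["jonathan", "jonathon"],
--     "jonathan": ["jon"],
--     "jonathon": ["jon"],
--     "stu": ["stuart", "stewart"],
--     "stuart": ["stu"],
--     "stewart": ["stu"],
--     "phil": ["philip", "phillip"],
--     "philip": ["phil"],
--     "phillip": ["phil"],
--     "ed": ["edward", "edmund"],
--     "edmund": ["ed"],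
--     "ash": ["ashley", "ashton"],
--     "ashley": ["ash"],
--     "ashton": ["ash"],
--     "jake": ["jacob"],
--     "jacob": ["jake"],
--     "jack": ["jackson", "john"],
--     "jackson": ["jack"],
--     "john": ["jack"],
--     "nate": ["nathan", "nathaniel"],
--     "nathan": ["nate", "nat"],
--     "nathaniel": ["nate"],
--     "josh": ["joshua"],
--     "joshua": ["josh"],
--     "zach": ["zachary"],
--     "zachary": ["zach"],
--     "luke": ["lucas"],
--     "lucas": ["luke"],
--     "brad": ["bradley"],
--     "bradley": ["brad"],
--     "drew": ["andrew"],
--     "mel": ["melissa", "melanie"],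
--     "melissa": ["mel"],
--     "melanie": ["mel"],
--     "bec": ["rebecca"],
--     "rebecca": ["bec"],
--     "soph": ["sophia", "sophie"],
--     "sophia": ["soph"],
--     "sophie": ["soph"],
--     "nat": ["natalie", "natasha", "nathan"],
--     "natalie": ["nat"],
--     "natasha": ["nat"],
--     "em": ["emma", "emily"],
--     "emma": ["em"],
--     "emily": ["em"],
--     "kel": ["kelly", "kelvin"],
--     "kelly": ["kel"],
--     "kelvin": ["kel"],
--     "les": ["leslie", "lester"],
--     "leslie": ["les"],
--     "lester": ["les"],
--     "russ": ["russell"],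
--     "russell": ["russ"],
--     "mick": ["michael"],
-- }
--
-- def _get_name_variants(first_name: str) -> list[str]:
--     """Return all possible full-form variants of a first name (including itself)."""
--     lower = first_name.lower()
--     return [lower] + _VARIANTS.get(lower, [])
-- ===== Notes on version B (the rewrite author's own statement) =====
-- stated objective: simpler
-- what changed: B replaces A's per-call work (forward dict lookup plus a reverse scan over all 53 dict items and their value lists with dedup) with a single precomputed flat table mapping every name (key or full form) directly to its complete variant list, so the function body is one dict lookup and a concatenation.
import Mathlib
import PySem

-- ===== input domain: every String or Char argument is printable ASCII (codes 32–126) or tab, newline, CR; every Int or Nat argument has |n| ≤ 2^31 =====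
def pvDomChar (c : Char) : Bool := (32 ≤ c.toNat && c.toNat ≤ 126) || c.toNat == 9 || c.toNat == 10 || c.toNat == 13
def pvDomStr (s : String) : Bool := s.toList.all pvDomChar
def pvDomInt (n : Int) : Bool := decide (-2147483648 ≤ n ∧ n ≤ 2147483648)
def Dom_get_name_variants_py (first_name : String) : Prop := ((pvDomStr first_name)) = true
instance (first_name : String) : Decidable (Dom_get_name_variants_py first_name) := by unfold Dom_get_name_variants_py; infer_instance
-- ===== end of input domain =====

set_option maxRecDepth 100000
set_option maxHeartbeats 2000000

-- ===== PORT A =====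
-- B replaces A's per-call forward lookup + full reverse scan of the abbreviation dict
-- with one precomputed flat table (name -> complete variant list): objective simpler
-- (the function body becomes one lookup), same results.

-- the module constant _NAME_ABBREVIATIONS (used by A)
def pvAbbr : PySem.Dict String (List String) :=
  PySem.Dict.ofList [("matt", ["matthew", "mathew"]), ("mike", ["michael"]), ("chris", ["christopher", "christine", "christina"]), ("rob", ["robert", "robin"]), ("bob", ["robert"]), ("dave", ["david"]), ("dan", ["daniel", "danny"]), ("nick", ["nicholas", "nicolas"]), ("tom", ["thomas"]), ("ben", ["benjamin"]), ("sam", ["samuel", "samantha"]), ("alex", ["alexander", "alexandra"]), ("max", ["maxwell", "maximilian"]), ("will", ["william"]), ("jim", ["james"]), ("joe", ["joseph"]), ("steve", ["steven", "stephen"]), ("tony", ["anthony"]), ("kate", ["katherine", "kathryn", "catherine"]), ("liz", ["elizabeth"]), ("meg", ["megan", "margaret"]), ("jen", ["jennifer", "jenna"]), ("pat", ["patrick", "patricia"]), ("andy", ["andrew"]), ("rick", ["richard"]), ("dick", ["richard"]), ("bill", ["william"]), ("ted", ["edward", "theodore"]), ("pete", ["peter"]), ("greg", ["gregory"]), ("tim",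 ["timothy"]), ("jon", ["jonathan", "jonathon"]), ("stu", ["stuart", "stewart"]), ("phil", ["philip", "phillip"]), ("ed", ["edward", "edmund"]), ("ash", ["ashley", "ashton"]), ("jake", ["jacob"]), ("jack", ["jackson", "john"]), ("nate", ["nathan", "nathaniel"]), ("josh", ["joshua"]), ("zach", ["zachary"]), ("luke", ["lucas"]), ("brad", ["bradley"]), ("drew", ["andrew"]), ("mel", ["melissa", "melanie"]), ("bec", ["rebecca"]), ("soph", ["sophia", "sophie"]), ("nat", ["natalie", "natasha", "nathan"]), ("em", ["emma", "emily"]), ("kel", ["kelly", "kelvin"]), ("les", ["leslie", "lester"]), ("russ", ["russell"]), ("mick", ["michael"])]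

-- port of A: forward lookup, then scan every (abbrev, fulls) item
def get_name_variants_py (first_name : String) : List String :=
  let lower := PySem.Str.lower first_name
  let variants : List String := [lower]
  let variants :=
    match pvAbbr.get? lower with
    | some fulls => variants ++ fulls
    | none => variants
  pvAbbr.items.foldl
    (fun variants p =>
      if p.2.contains lower && !(variants.contains p.1) then variants ++ [p.1] else variants)
    variants

-- ===== PORT B =====
-- the module constant _VARIANTS of Source B: flat precomputed table, every name that
-- appears in the abbreviation dict (key or full form) -> its complete variant list
def pvVariants : PySem.Dict String (List String) :=
  PySem.Dict.ofList [("matt", ["matthew", "mathew"]), ("matthew", ["matt"]), ("mathew", ["matt"]), ("mike", ["michael"]), ("michael", ["mike", "mick"]), ("chris", ["christopher", "christine", "christina"]), ("christopher", ["chris"]), ("christine", ["chris"]), ("christina", ["chris"]), ("rob", ["robert", "robin"]), ("robert", ["rob", "bob"]), ("robin", ["rob"]), ("bob", ["robert"]), ("dave", ["david"]), ("david", ["dave"]), ("dan", ["daniel", "danny"]), ("daniel", ["dan"]), ("danny", ["dan"]), ("nick", ["nicholas", "nicolas"]), ("nicholas", ["nick"]), ("nicolas", ["nick"]), ("tom",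 ["thomas"]), ("thomas", ["tom"]), ("ben", ["benjamin"]), ("benjamin", ["ben"]), ("sam", ["samuel", "samantha"]), ("samuel", ["sam"]), ("samantha", ["sam"]), ("alex", ["alexander", "alexandra"]), ("alexander", ["alex"]), ("alexandra", ["alex"]), ("max", ["maxwell", "maximilian"]), ("maxwell", ["max"]), ("maximilian", ["max"]), ("will", ["william"]), ("william", ["will", "bill"]), ("jim", ["james"]), ("james", ["jim"]), ("joe", ["joseph"]), ("joseph", ["joe"]), ("steve", ["steven", "stephen"]), ("steven", ["steve"]), ("stephen", ["steve"]), ("tony", ["anthony"]), ("anthony", ["tony"]), ("kate", ["katherine", "kathryn", "catherine"]), ("katherine", ["kate"]), ("kathryn", ["kate"]), ("catherine", ["kate"]), ("liz", ["elizabeth"]), ("elizabeth", ["liz"]), ("meg", ["megan", "margaret"]), ("megan", ["meg"]), ("margaret", ["meg"]), ("jen", ["jennifer", "jenna"]), ("jennifer", ["jen"]), ("jenna", ["jen"]), ("pat", ["patrick", "patricia"]), ("patrick", ["pat"]), ("patricia", ["pat"]), ("andy", ["andrew"]), ("andrew", ["andy", "drew"]), ("rick", ["richard"]), ("richard", ["rick",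 "dick"]), ("dick", ["richard"]), ("bill", ["william"]), ("ted", ["edward", "theodore"]), ("edward", ["ted", "ed"]), ("theodore", ["ted"]), ("pete", ["peter"]), ("peter", ["pete"]), ("greg", ["gregory"]), ("gregory", ["greg"]), ("tim", ["timothy"]), ("timothy", ["tim"]), ("jon", ["jonathan", "jonathon"]), ("jonathan", ["jon"]), ("jonathon", ["jon"]), ("stu", ["stuart", "stewart"]), ("stuart", ["stu"]), ("stewart", ["stu"]), ("phil", ["philip", "phillip"]), ("philip", ["phil"]), ("phillip", ["phil"]), ("ed", ["edward", "edmund"]), ("edmund", ["ed"]), ("ash", ["ashley", "ashton"]), ("ashley", ["ash"]), ("ashton", ["ash"]), ("jake", ["jacob"]), ("jacob", ["jake"]), ("jack", ["jackson", "john"]), ("jackson", ["jack"]), ("john", ["jack"]), ("nate", ["nathan", "nathaniel"]), ("nathan", ["nate", "nat"]), ("nathaniel", ["nate"]), ("josh", ["joshua"]), ("joshua", ["josh"]), ("zach", ["zachary"]), ("zachary", ["zach"]), ("luke", ["lucas"]), ("lucas", ["luke"]), ("brad", ["bradley"]), ("bradley", ["brad"]), ("drew", ["andrew"]), ("mel",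 ["melissa", "melanie"]), ("melissa", ["mel"]), ("melanie", ["mel"]), ("bec", ["rebecca"]), ("rebecca", ["bec"]), ("soph", ["sophia", "sophie"]), ("sophia", ["soph"]), ("sophie", ["soph"]), ("nat", ["natalie", "natasha", "nathan"]), ("natalie", ["nat"]), ("natasha", ["nat"]), ("em", ["emma", "emily"]), ("emma", ["em"]), ("emily", ["em"]), ("kel", ["kelly", "kelvin"]), ("kelly", ["kel"]), ("kelvin", ["kel"]), ("les", ["leslie", "lester"]), ("leslie", ["les"]), ("lester", ["les"]), ("russ", ["russell"]), ("russell", ["russ"]), ("mick", ["michael"])]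

def get_name_variants_py_alt (first_name : String) : List String :=
  let lower := PySem.Str.lower first_name
  [lower] ++ pvVariants.getD lower []

-- ===== PRECONDITION & SPEC =====
def Spec_get_name_variants_py (first_name : String) (out : List String) : Prop := out = get_name_variants_py_alt first_name
instance (first_name : String) (out : List String) : Decidable (Spec_get_name_variants_py first_name out) := by unfold Spec_get_name_variants_py; infer_instance

-- ===== CLAIM (what is proved, stated in full; the proofs are below) =====
def Claim_equal_get_name_variants_py : Prop := ∀ (first_name : String), Dom_get_name_variants_py first_name → Spec_get_name_variants_py first_name (get_name_variants_py first_name)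

-- ===== LEMMAS AND PROOFS =====

-- pvAbbr pre-evaluated to its literal items (proved equal below), so the finite
-- `decide` does not rebuild the dict at every evaluation
def pvAbbrLit : PySem.Dict String (List String) :=
  PySem.Dict.mk [("matt", ["matthew", "mathew"]), ("mike", ["michael"]), ("chris", ["christopher", "christine", "christina"]), ("rob", ["robert", "robin"]), ("bob", ["robert"]), ("dave", ["david"]), ("dan", ["daniel", "danny"]), ("nick", ["nicholas", "nicolas"]), ("tom", ["thomas"]), ("ben", ["benjamin"]), ("sam", ["samuel", "samantha"]), ("alex", ["alexander", "alexandra"]), ("max", ["maxwell", "maximilian"]), ("will", ["william"]), ("jim", ["james"]), ("joe", ["joseph"]), ("steve", ["steven", "stephen"]), ("tony", ["anthony"]), ("kate", ["katherine", "kathryn", "catherine"]), ("liz", ["elizabeth"]), ("meg", ["megan", "margaret"]), ("jen", ["jennifer", "jenna"]), ("pat", ["patrick", "patricia"]), ("andy", ["andrew"]), ("rick", ["richard"]), ("dick", ["richard"]), ("bill", ["william"]), ("ted", ["edward", "theodore"]), ("pete", ["peter"]), ("greg", ["gregory"]), ("tim", ["timothy"]), ("jon", ["jonathan", "jonathon"]),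 ("stu", ["stuart", "stewart"]), ("phil", ["philip", "phillip"]), ("ed", ["edward", "edmund"]), ("ash", ["ashley", "ashton"]), ("jake", ["jacob"]), ("jack", ["jackson", "john"]), ("nate", ["nathan", "nathaniel"]), ("josh", ["joshua"]), ("zach", ["zachary"]), ("luke", ["lucas"]), ("brad", ["bradley"]), ("drew", ["andrew"]), ("mel", ["melissa", "melanie"]), ("bec", ["rebecca"]), ("soph", ["sophia", "sophie"]), ("nat", ["natalie", "natasha", "nathan"]), ("em", ["emma", "emily"]), ("kel", ["kelly", "kelvin"]), ("les", ["leslie", "lester"]), ("russ", ["russell"]), ("mick", ["michael"])]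

def pvVariantsLit : PySem.Dict String (List String) :=
  PySem.Dict.mk [("matt", ["matthew", "mathew"]), ("matthew", ["matt"]), ("mathew", ["matt"]), ("mike", ["michael"]), ("michael", ["mike", "mick"]), ("chris", ["christopher", "christine", "christina"]), ("christopher", ["chris"]), ("christine", ["chris"]), ("christina", ["chris"]), ("rob", ["robert", "robin"]), ("robert", ["rob", "bob"]), ("robin", ["rob"]), ("bob", ["robert"]), ("dave", ["david"]), ("david", ["dave"]), ("dan", ["daniel", "danny"]), ("daniel", ["dan"]), ("danny", ["dan"]), ("nick", ["nicholas", "nicolas"]), ("nicholas", ["nick"]), ("nicolas", ["nick"]), ("tom", ["thomas"]), ("thomas", ["tom"]), ("ben", ["benjamin"]), ("benjamin", ["ben"]), ("sam", ["samuel", "samantha"]), ("samuel", ["sam"]), ("samantha", ["sam"]), ("alex", ["alexander", "alexandra"]), ("alexander", ["alex"]), ("alexandra", ["alex"]), ("max", ["maxwell", "maximilian"]), ("maxwell", ["max"]), ("maximilian", ["max"]), ("will", ["william"]), ("william", ["will", "bill"]), ("jim", ["james"]), ("james", ["jim"]), ("joe", ["joseph"]), ("joseph", ["joe"]), ("steve",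 ["steven", "stephen"]), ("steven", ["steve"]), ("stephen", ["steve"]), ("tony", ["anthony"]), ("anthony", ["tony"]), ("kate", ["katherine", "kathryn", "catherine"]), ("katherine", ["kate"]), ("kathryn", ["kate"]), ("catherine", ["kate"]), ("liz", ["elizabeth"]), ("elizabeth", ["liz"]), ("meg", ["megan", "margaret"]), ("megan", ["meg"]), ("margaret", ["meg"]), ("jen", ["jennifer", "jenna"]), ("jennifer", ["jen"]), ("jenna", ["jen"]), ("pat", ["patrick", "patricia"]), ("patrick", ["pat"]), ("patricia", ["pat"]), ("andy", ["andrew"]), ("andrew", ["andy", "drew"]), ("rick", ["richard"]), ("richard", ["rick", "dick"]), ("dick", ["richard"]), ("bill", ["william"]), ("ted", ["edward", "theodore"]), ("edward", ["ted", "ed"]), ("theodore", ["ted"]), ("pete", ["peter"]), ("peter", ["pete"]), ("greg", ["gregory"]), ("gregory", ["greg"]), ("tim", ["timothy"]), ("timothy", ["tim"]), ("jon", ["jonathan", "jonathon"]), ("jonathan", ["jon"]), ("jonathon", ["jon"]), ("stu", ["stuart", "stewart"]), ("stuart", ["stu"]), ("stewart", ["stu"]), ("phil", ["philip", "phillip"]),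 ("philip", ["phil"]), ("phillip", ["phil"]), ("ed", ["edward", "edmund"]), ("edmund", ["ed"]), ("ash", ["ashley", "ashton"]), ("ashley", ["ash"]), ("ashton", ["ash"]), ("jake", ["jacob"]), ("jacob", ["jake"]), ("jack", ["jackson", "john"]), ("jackson", ["jack"]), ("john", ["jack"]), ("nate", ["nathan", "nathaniel"]), ("nathan", ["nate", "nat"]), ("nathaniel", ["nate"]), ("josh", ["joshua"]), ("joshua", ["josh"]), ("zach", ["zachary"]), ("zachary", ["zach"]), ("luke", ["lucas"]), ("lucas", ["luke"]), ("brad", ["bradley"]), ("bradley", ["brad"]), ("drew", ["andrew"]), ("mel", ["melissa", "melanie"]), ("melissa", ["mel"]), ("melanie", ["mel"]), ("bec", ["rebecca"]), ("rebecca", ["bec"]), ("soph", ["sophia", "sophie"]), ("sophia", ["soph"]), ("sophie", ["soph"]), ("nat", ["natalie", "natasha", "nathan"]), ("natalie", ["nat"]), ("natasha", ["nat"]), ("em", ["emma", "emily"]), ("emma", ["em"]), ("emily", ["em"]), ("kel", ["kelly", "kelvin"]), ("kelly", ["kel"]), ("kelvin", ["kel"]), ("les", ["leslie", "lester"]), ("leslie",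 ["les"]), ("lester", ["les"]), ("russ", ["russell"]), ("russell", ["russ"]), ("mick", ["michael"])]

-- A's body after lowering, as a function of the lowered string
def pvACore (t : String) : List String :=
  let variants : List String := [t]
  let variants :=
    match pvAbbrLit.get? t with
    | some fulls => variants ++ fulls
    | none => variants
  pvAbbrLit.items.foldl
    (fun variants p =>
      if p.2.contains t && !(variants.contains p.1) then variants ++ [p.1] else variants)
    variants

-- B's body after lowering
def pvBCore (t : String) : List String := [t] ++ pvVariantsLit.getD t []

-- every string that occurs anywhere in the table (keys and full names)
def pvRelevant : List String := ["matt", "matthew", "mathew", "mike", "michael", "chris", "christopher", "christine", "christina", "rob", "robert", "robin", "bob", "dave", "david", "dan", "daniel", "danny", "nick", "nicholas", "nicolas", "tom", "thomas", "ben", "benjamin", "sam", "samuel", "samantha", "alex", "alexander", "alexandra", "max", "maxwell", "maximilian", "will", "william", "jim", "james", "joe", "joseph", "steve", "steven", "stephen", "tony", "anthony", "kate", "katherine", "kathryn", "catherine", "liz", "elizabeth", "meg", "megan", "margaret", "jen", "jennifer", "jenna", "pat", "patrick", "patricia", "andy", "andrew", "rick", "richard", "dick", "bill", "ted", "edward",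 "theodore", "pete", "peter", "greg", "gregory", "tim", "timothy", "jon", "jonathan", "jonathon", "stu", "stuart", "stewart", "phil", "philip", "phillip", "ed", "edmund", "ash", "ashley", "ashton", "jake", "jacob", "jack", "jackson", "john", "nate", "nathan", "nathaniel", "josh", "joshua", "zach", "zachary", "luke", "lucas", "brad", "bradley", "drew", "mel", "melissa", "melanie", "bec", "rebecca", "soph", "sophia", "sophie", "nat", "natalie", "natasha", "em", "emma", "emily", "kel", "kelly", "kelvin", "les", "leslie", "lester", "russ", "russell", "mick"]

lemma pvAbbr_eq_lit : pvAbbr = pvAbbrLit := by decide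

lemma pvVariants_eq_lit : pvVariants = pvVariantsLit := by decide

lemma pvA_eq_core (fn : String) : get_name_variants_py fn = pvACore (PySem.Str.lower fn) := by
  unfold get_name_variants_py pvACore
  rw [pvAbbr_eq_lit]

lemma pvB_eq_core (fn : String) :
    get_name_variants_py_alt fn = pvBCore (PySem.Str.lower fn) := by
  unfold get_name_variants_py_alt pvBCore
  rw [pvVariants_eq_lit]

lemma pvCore_eq_of_mem (t : String) (h : t ∈ pvRelevant) : pvACore t = pvBCore t := by
  have hall : pvRelevant.all (fun s => pvACore s == pvBCore s) = true := by decide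
  have := List.all_eq_true.mp hall t h
  exact eq_of_beq this

lemma pvFoldl_no_hit (t : String) (l : List (String × List String)) (acc : List String)
    (h : ∀ p ∈ l, p.2.contains t = false) :
    l.foldl
      (fun variants p =>
        if p.2.contains t && !(variants.contains p.1) then variants ++ [p.1] else variants)
      acc = acc := by
  induction l generalizing acc with
  | nil => rfl
  | cons p l ih =>
      have hp := h p (List.mem_cons_self ..)
      simp only [List.foldl_cons, hp, Bool.false_and, if_neg Bool.false_ne_true]
      exact ih acc (fun q hq => h q (List.mem_cons_of_mem _ hq))

lemma pvCore_eq_of_not_mem (t : String) (h : t ∉ pvRelevant) : pvACore t = pvBCore t := by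
  have hkeys : ∀ s ∈ pvAbbrLit.keys, s ∈ pvRelevant := by decide
  have hvkeys : ∀ s ∈ pvVariantsLit.keys, s ∈ pvRelevant := by decide
  have hfulls : ∀ p ∈ pvAbbrLit.items, p.2.contains t = false := by
    have hx : ∀ p ∈ pvAbbrLit.items, ∀ s ∈ p.2, s ∈ pvRelevant := by decide
    intro p hp
    by_contra hc
    exact h (hx p hp t (List.contains_iff_mem.mp (by revert hc; cases p.2.contains t <;> simp)))
  have hget : pvAbbrLit.get? t = none :=
    (PySem.Dict.get?_eq_none_iff_not_mem_keys _ _).mpr (fun hm => h (hkeys t hm))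
  have hvcontains : pvVariantsLit.contains t = false := by
    rw [PySem.Dict.contains_eq_isSome_get?,
      (PySem.Dict.get?_eq_none_iff_not_mem_keys _ _).mpr (fun hm => h (hvkeys t hm))]
    rfl
  unfold pvACore pvBCore
  rw [hget, PySem.Dict.getD_of_not_contains _ _ hvcontains, pvFoldl_no_hit t _ _ hfulls]
  simp

-- ===== VERDICT (by name: the statement is the Claim_ definition above) =====
theorem get_name_variants_py_spec : Claim_equal_get_name_variants_py := by
  intro fn _
  unfold Spec_get_name_variants_py
  rw [pvA_eq_core, pvB_eq_core]
  by_cases h : PySem.Str.lower fn ∈ pvRelevant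
  · exact pvCore_eq_of_mem _ h
  · exact pvCore_eq_of_not_mem _ h
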